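-- pv_equiv track=rewrite | github.com/cisco-ai-defense/mcp-scanner | mcpscanner/utils/file_magic.py | _classify_family
-- ===== SOURCE A (Python) =====
-- _FAMILY_MAP = {
--     "text/": "text",
--     "application/json": "text",
--     "application/xml": "text",
--     "application/javascript": "text",
--     "application/x-yaml": "text",
--     "application/toml": "text",
--     "application/x-sh": "text",
--     "application/x-shellscript": "text",
--     "application/x-python": "text",
--     "application/x-ruby": "text",
--     "application/x-perl": "text",
--     "application/x-php": "text",
-- }
--
-- def _classify_family(mime_type: str) -> str:
--     """Map a MIME type to a content family (text, image, audio, video, application, etc.)."""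
--     if not mime_type:
--         return "unknown"
--     mime_lower = mime_type.lower()
--     # Check exact matches first
--     for pattern, family in _FAMILY_MAP.items():
--         if pattern.endswith("/"):
--             if mime_lower.startswith(pattern):
--                 return family
--         elif mime_lower == pattern:
--             return family
--     # Broad categories
--     if mime_lower.startswith("image/"):
--         return "image"
--     if mime_lower.startswith("audio/"):
--         return "audio"
--     if mime_lower.startswith("video/"):
--         return "video"
--     return "application"
-- ===== SOURCE B (Python) =====
-- _TEXT_APP_SUBTYPES = frozenset({
--     "json", "xml", "javascript", "x-yaml", "toml", "x-sh",
--     "x-shellscript", "x-python", "x-ruby", "x-perl", "x-php",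
-- })
--
-- def _classify_family(mime_type: str) -> str:
--     """Map a MIME type to a content family (text, image, audio, video, application, etc.)."""
--     if not mime_type:
--         return "unknown"
--     top, sep, sub = mime_type.lower().partition("/")
--     if not sep:
--         return "application"
--     if top == "text":
--         return "text"
--     if top == "application" and sub in _TEXT_APP_SUBTYPES:
--         return "text"
--     if top in ("image", "audio", "video"):
--         return top
--     return "application"
-- ===== Notes on version B (the rewrite author's own statement) =====
-- stated objective: alternative
-- what changed: B parses the MIME string once, partitioning it at the first slash into top-level type and subtype, and dispatches on the top-level token (subtype checked against a frozenset only under the application type), instead of A's linear scan of a prefix/exact pattern map followed by three prefix tests.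
import Mathlib
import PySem

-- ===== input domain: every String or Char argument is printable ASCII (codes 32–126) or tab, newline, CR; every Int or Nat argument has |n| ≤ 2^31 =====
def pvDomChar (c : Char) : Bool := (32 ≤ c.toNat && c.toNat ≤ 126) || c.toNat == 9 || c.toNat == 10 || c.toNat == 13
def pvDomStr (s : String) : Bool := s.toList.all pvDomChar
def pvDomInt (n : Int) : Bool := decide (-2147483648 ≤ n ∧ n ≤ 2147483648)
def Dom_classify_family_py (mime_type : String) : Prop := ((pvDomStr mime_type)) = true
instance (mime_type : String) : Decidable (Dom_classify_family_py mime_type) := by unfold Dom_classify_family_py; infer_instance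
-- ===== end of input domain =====

-- B parses the MIME type once with partition('/') and dispatches on the top-level token instead of A's pattern-map scan; objective: alternative.

-- ===== PORT A =====
-- _FAMILY_MAP as an association list in insertion order
def pvFamilyMap : List (String × String) :=
  [("text/", "text"), ("application/json", "text"), ("application/xml", "text"),
   ("application/javascript", "text"), ("application/x-yaml", "text"),
   ("application/toml", "text"), ("application/x-sh", "text"),
   ("application/x-shellscript", "text"), ("application/x-python", "text"),
   ("application/x-ruby", "text"), ("application/x-perl", "text"),
   ("application/x-php", "text")]

-- the 'for pattern, family in _FAMILY_MAP.items()' loop (first match wins)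
def pvLoopA : List (String × String) → List Char → Option String
  | [], _ => none
  | (pat, fam) :: rest, m =>
    if PySem.Chars.endswith pat.toList "/".toList then
      if PySem.Chars.startswith m pat.toList then some fam else pvLoopA rest m
    else if m = pat.toList then some fam else pvLoopA rest m

def classify_family_py (mime_type : String) : String :=
  if mime_type.toList = [] then "unknown"
  else
    let m := PySem.Chars.lower mime_type.toList
    match pvLoopA pvFamilyMap m with
    | some fam => fam
    | none =>
      if PySem.Chars.startswith m "image/".toList then "image"
      else if PySem.Chars.startswith m "audio/".toList then "audio"
      else if PySem.Chars.startswith m "video/".toList then "video"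
      else "application"

-- ===== PORT B =====
-- str.partition('/'): (part before first '/', found?, part after); hand-written, exact for a 1-char separator
def pvPartitionSlash : List Char → List Char × Bool × List Char
  | [] => ([], false, [])
  | c :: cs =>
    if c = '/' then ([], true, cs)
    else
      let r := pvPartitionSlash cs
      (c :: r.1, r.2.1, r.2.2)

-- frozenset of the text-family subtypes under 'application/'
def pvTextSubtypes : PySem.Set (List Char) :=
  PySem.Set.ofList
    ["json".toList, "xml".toList, "javascript".toList, "x-yaml".toList,
     "toml".toList, "x-sh".toList, "x-shellscript".toList, "x-python".toList,
     "x-ruby".toList, "x-perl".toList, "x-php".toList]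

def classify_family_py_alt (mime_type : String) : String :=
  if mime_type.toList = [] then "unknown"
  else
    let p := pvPartitionSlash (PySem.Chars.lower mime_type.toList)
    if p.2.1 = false then "application"
    else if p.1 = "text".toList then "text"
    else if p.1 = "application".toList && PySem.Set.contains pvTextSubtypes p.2.2 then "text"
    else if ["image".toList, "audio".toList, "video".toList].contains p.1 then String.ofList p.1
    else "application"

-- ===== PRECONDITION & SPEC =====
def Spec_classify_family_py (mime_type : String) (out : String) : Prop := out = classify_family_py_alt mime_type
instance (mime_type : String) (out : String) : Decidable (Spec_classify_family_py mime_type out) := by unfold Spec_classify_family_py; infer_instance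

-- ===== CLAIM (what is proved, stated in full; the proofs are below) =====
def Claim_equal_classify_family_py : Prop := ∀ (mime_type : String), Dom_classify_family_py mime_type → Spec_classify_family_py mime_type (classify_family_py mime_type)

-- ===== LEMMAS AND PROOFS =====

-- the exact (non-prefix) patterns of _FAMILY_MAP, as char lists
def pvExactList : List (List Char) :=
  ["application/json".toList, "application/xml".toList, "application/javascript".toList,
   "application/x-yaml".toList, "application/toml".toList, "application/x-sh".toList,
   "application/x-shellscript".toList, "application/x-python".toList,
   "application/x-ruby".toList, "application/x-perl".toList, "application/x-php".toList]

set_option maxHeartbeats 1600000 in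
-- A's loop result characterised: "text" iff m starts with "text/" or is one of the exact strings
theorem pvLoopA_eq (m : List Char) :
    pvLoopA pvFamilyMap m =
      (if PySem.Chars.startswith m "text/".toList || decide (m ∈ pvExactList)
       then some "text" else none) := by
  have e0 : PySem.Chars.endswith "text/".toList "/".toList = true := by decide
  have e1 : PySem.Chars.endswith "application/json".toList "/".toList = false := by decide
  have e2 : PySem.Chars.endswith "application/xml".toList "/".toList = false := by decide
  have e3 : PySem.Chars.endswith "application/javascript".toList "/".toList = false := by decide
  have e4 : PySem.Chars.endswith "application/x-yaml".toList "/".toList = false := by decide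
  have e5 : PySem.Chars.endswith "application/toml".toList "/".toList = false := by decide
  have e6 : PySem.Chars.endswith "application/x-sh".toList "/".toList = false := by decide
  have e7 : PySem.Chars.endswith "application/x-shellscript".toList "/".toList = false := by decide
  have e8 : PySem.Chars.endswith "application/x-python".toList "/".toList = false := by decide
  have e9 : PySem.Chars.endswith "application/x-ruby".toList "/".toList = false := by decide
  have e10 : PySem.Chars.endswith "application/x-perl".toList "/".toList = false := by decide
  have e11 : PySem.Chars.endswith "application/x-php".toList "/".toList = false := by decide
  simp only [pvFamilyMap, pvLoopA, e0, e1, e2, e3, e4, e5, e6, e7, e8, e9, e10, e11,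
    if_true, Bool.false_eq_true, if_false, pvExactList]
  split_ifs <;> simp_all [List.mem_cons, List.not_mem_nil]

-- splitting at the first '/' is injective on the shape top ++ '/' :: sub with slash-free top
theorem pvNoSlashEq (top : List Char) :
    ∀ (w sub v : List Char), '/' ∉ top → '/' ∉ w →
      (top ++ '/' :: sub = w ++ '/' :: v ↔ top = w ∧ sub = v) := by
  induction top with
  | nil =>
    intro w sub v _ hw
    cases w with
    | nil => simp
    | cons d w' =>
      simp only [List.nil_append, List.cons_append, List.cons.injEq]
      constructor
      · rintro ⟨h, _⟩
        exact absurd (h ▸ List.mem_cons_self) hw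
      · rintro ⟨h, _⟩; exact absurd h.symm (by simp)
  | cons c t ih =>
    intro w sub v ht hw
    cases w with
    | nil =>
      simp only [List.nil_append, List.cons_append, List.cons.injEq]
      constructor
      · rintro ⟨h, _⟩
        exact absurd (h ▸ List.mem_cons_self) ht
      · rintro ⟨h, _⟩; exact absurd h (by simp)
    | cons d w' =>
      simp only [List.cons_append, List.cons.injEq]
      have := ih w' sub v (fun h => ht (List.mem_cons_of_mem _ h)) (fun h => hw (List.mem_cons_of_mem _ h))
      constructor
      · rintro ⟨rfl, h⟩; obtain ⟨h1, h2⟩ := this.mp h; exact ⟨⟨rfl, h1⟩, h2⟩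
      · rintro ⟨⟨rfl, h1⟩, h2⟩; exact ⟨rfl, this.mpr ⟨h1, h2⟩⟩

-- partition found a separator: m decomposes, top slash-free
theorem pvPartTrue : ∀ (m top sub : List Char), pvPartitionSlash m = (top, true, sub) →
    m = top ++ '/' :: sub ∧ '/' ∉ top := by
  intro m
  induction m with
  | nil => intro top sub h; simp [pvPartitionSlash] at h
  | cons c cs ih =>
    intro top sub h
    by_cases hc : c = '/'
    · simp only [pvPartitionSlash, hc, if_true, Prod.mk.injEq] at h
      obtain ⟨h1, _, h3⟩ := h
      subst h1; subst h3; simp [hc]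
    · simp only [pvPartitionSlash, hc, if_false, Prod.mk.injEq] at h
      obtain ⟨h1, h2, h3⟩ := h
      rcases hr : pvPartitionSlash cs with ⟨t', s', u'⟩
      rw [hr] at h1 h2 h3
      simp only at h1 h2 h3
      obtain ⟨hm, hns⟩ := ih t' u' (by rw [hr, h2, h3])
      subst h1
      constructor
      · simp [hm, h3]
      · simp only [List.mem_cons, not_or]
        exact ⟨fun h => hc h.symm, fun h => hns h⟩

-- no separator: m has no '/'
theorem pvPartFalse : ∀ (m top sub : List Char), pvPartitionSlash m = (top, false, sub) →
    '/' ∉ m := by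
  intro m
  induction m with
  | nil => intro _ _ _; simp
  | cons c cs ih =>
    intro top sub h
    by_cases hc : c = '/'
    · simp [pvPartitionSlash, hc] at h
    · simp only [pvPartitionSlash, hc, if_false, Prod.mk.injEq] at h
      rcases hr : pvPartitionSlash cs with ⟨t', s', u'⟩
      rw [hr] at h
      obtain ⟨_, h2, h3⟩ := h
      simp only at h2 h3
      have := ih t' u' (by rw [hr, h2, h3])
      simp only [List.mem_cons, not_or]
      exact ⟨fun h => hc h.symm, fun h => this h⟩

-- startswith with a slash-terminated, slash-free word, through the partition
theorem pvSwPart (m top sub : List Char) (sep : Bool) (w : List Char)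
    (hP : pvPartitionSlash m = (top, sep, sub)) (hw : '/' ∉ w) :
    (PySem.Chars.startswith m (w ++ ['/']) = true ↔ (sep = true ∧ top = w)) := by
  rw [PySem.Chars.startswith_iff]
  cases sep with
  | false =>
    have hns := pvPartFalse m top sub hP
    constructor
    · rintro ⟨t, ht⟩
      exact absurd (by rw [← ht]; simp) hns
    · rintro ⟨h, _⟩; cases h
  | true =>
    obtain ⟨hm, hnt⟩ := pvPartTrue m top sub hP
    constructor
    · rintro ⟨t, ht⟩
      rw [hm] at ht
      have : top ++ '/' :: sub = w ++ '/' :: t := by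
        rw [← ht]; simp
      exact ⟨rfl, (pvNoSlashEq top w sub t hnt hw).mp this |>.1⟩
    · rintro ⟨_, rfl⟩
      exact ⟨sub, by rw [hm]; simp⟩

-- membership in the exact pattern list, through the partition (separator found)
set_option maxHeartbeats 1600000 in
theorem pvMemExact (m top sub : List Char) (hP : pvPartitionSlash m = (top, true, sub)) :
    (m ∈ pvExactList ↔ (top = "application".toList ∧ sub ∈ pvTextSubtypes)) := by
  obtain ⟨hm, hnt⟩ := pvPartTrue m top sub hP
  have happ : ('/' : Char) ∉ "application".toList := by decide
  have hiff : ∀ v : List Char, (top ++ '/' :: sub = "application".toList ++ '/' :: v)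
      ↔ (top = "application".toList ∧ sub = v) :=
    fun v => pvNoSlashEq top _ sub v hnt happ
  have h1 : "application/json".toList = "application".toList ++ '/' :: "json".toList := by decide
  have h2 : "application/xml".toList = "application".toList ++ '/' :: "xml".toList := by decide
  have h3 : "application/javascript".toList = "application".toList ++ '/' :: "javascript".toList := by decide
  have h4 : "application/x-yaml".toList = "application".toList ++ '/' :: "x-yaml".toList := by decide
  have h5 : "application/toml".toList = "application".toList ++ '/' :: "toml".toList := by decide
  have h6 : "application/x-sh".toList = "application".toList ++ '/' :: "x-sh".toList := by decide
  have h7 : "application/x-shellscript".toList = "application".toList ++ '/' :: "x-shellscript".toList := by decide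
  have h8 : "application/x-python".toList = "application".toList ++ '/' :: "x-python".toList := by decide
  have h9 : "application/x-ruby".toList = "application".toList ++ '/' :: "x-ruby".toList := by decide
  have h10 : "application/x-perl".toList = "application".toList ++ '/' :: "x-perl".toList := by decide
  have h11 : "application/x-php".toList = "application".toList ++ '/' :: "x-php".toList := by decide
  have hset : pvTextSubtypes = ["json".toList, "xml".toList, "javascript".toList, "x-yaml".toList,
      "toml".toList, "x-sh".toList, "x-shellscript".toList, "x-python".toList,
      "x-ruby".toList, "x-perl".toList, "x-php".toList] := by decide
  simp only [pvExactList, List.mem_cons, List.not_mem_nil, or_false, hm,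
    h1, h2, h3, h4, h5, h6, h7, h8, h9, h10, h11, hiff, hset, List.mem_cons, List.not_mem_nil, or_false]
  tauto

-- no '/' in m: m is none of the exact patterns
theorem pvMemExactFalse (m : List Char) (h : '/' ∉ m) : m ∉ pvExactList := by
  simp only [pvExactList, List.mem_cons, List.not_mem_nil, or_false]
  rintro (rfl|rfl|rfl|rfl|rfl|rfl|rfl|rfl|rfl|rfl|rfl) <;> exact h (by decide)

-- ===== VERDICT (by name: the statement is the Claim_ definition above) =====
set_option maxHeartbeats 1600000 in
theorem classify_family_py_spec : Claim_equal_classify_family_py := by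
  intro s _
  unfold Spec_classify_family_py classify_family_py classify_family_py_alt
  by_cases he : s.toList = []
  · simp [he]
  · simp only [he, if_false]
    rw [pvLoopA_eq]
    rcases hP : pvPartitionSlash (PySem.Chars.lower s.toList) with ⟨top, sep, sub⟩
    set m := PySem.Chars.lower s.toList with hmdef
    have htext : "text/".toList = "text".toList ++ ['/'] := by decide
    have himg : "image/".toList = "image".toList ++ ['/'] := by decide
    have haud : "audio/".toList = "audio".toList ++ ['/'] := by decide
    have hvid : "video/".toList = "video".toList ++ ['/'] := by decide
    have swT := pvSwPart m top sub sep "text".toList hP (by decide)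
    have swI := pvSwPart m top sub sep "image".toList hP (by decide)
    have swA := pvSwPart m top sub sep "audio".toList hP (by decide)
    have swV := pvSwPart m top sub sep "video".toList hP (by decide)
    cases sep with
    | false =>
      have hns := pvPartFalse m top sub hP
      have hT : PySem.Chars.startswith m "text/".toList = false := by
        rw [htext]; simp only [Bool.eq_false_iff]; intro h
        exact absurd ((swT.mp h).1) (by simp)
      have hI : PySem.Chars.startswith m "image/".toList = false := by
        rw [himg]; simp only [Bool.eq_false_iff]; intro h
        exact absurd ((swI.mp h).1) (by simp)
      have hA : PySem.Chars.startswith m "audio/".toList = false := by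
        rw [haud]; simp only [Bool.eq_false_iff]; intro h
        exact absurd ((swA.mp h).1) (by simp)
      have hV : PySem.Chars.startswith m "video/".toList = false := by
        rw [hvid]; simp only [Bool.eq_false_iff]; intro h
        exact absurd ((swV.mp h).1) (by simp)
      have hE : m ∉ pvExactList := pvMemExactFalse m hns
      simp at hT hI hA hV
      simp [hT, hI, hA, hV, hE, hP]
    | true =>
      have hE := pvMemExact m top sub hP
      have hsetcon : PySem.Set.contains pvTextSubtypes sub = decide (sub ∈ pvTextSubtypes) := by
        simp [PySem.Set.contains, List.contains_eq_mem]
      by_cases hTop : top = "text".toList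
      · have hT : PySem.Chars.startswith m "text/".toList = true := by
          rw [htext]; exact swT.mpr ⟨rfl, hTop⟩
        simp at hT
        simp [hT, hP, hTop]
      · have hT : PySem.Chars.startswith m "text/".toList = false := by
          rw [htext]; simp only [Bool.eq_false_iff]; intro h
          exact hTop (swT.mp h).2
        by_cases hApp : top = "application".toList
        · by_cases hSub : sub ∈ pvTextSubtypes
          · have : m ∈ pvExactList := hE.mpr ⟨hApp, hSub⟩
            simp at hT
            simp [hT, this, hP, hApp, hSub, hsetcon, hTop]
          · have hnm : m ∉ pvExactList := fun h => hSub (hE.mp h).2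
            have hI : PySem.Chars.startswith m "image/".toList = false := by
              rw [himg]; simp only [Bool.eq_false_iff]; intro h
              have := (swI.mp h).2; rw [hApp] at this; exact absurd this (by decide)
            have hA : PySem.Chars.startswith m "audio/".toList = false := by
              rw [haud]; simp only [Bool.eq_false_iff]; intro h
              have := (swA.mp h).2; rw [hApp] at this; exact absurd this (by decide)
            have hV : PySem.Chars.startswith m "video/".toList = false := by
              rw [hvid]; simp only [Bool.eq_false_iff]; intro h
              have := (swV.mp h).2; rw [hApp] at this; exact absurd this (by decide)
            have hAppMem : (["image".toList, "audio".toList, "video".toList].contains top) = false := by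
              rw [hApp]; decide
            simp at hT hI hA hV
            simp [hT, hI, hA, hV, hnm, hP, hApp, hSub, hsetcon, hTop, hAppMem]
        · have hnm : m ∉ pvExactList := fun h => hApp (hE.mp h).1
          by_cases hImg : top = "image".toList
          · have hI : PySem.Chars.startswith m "image/".toList = true := by
              rw [himg]; exact swI.mpr ⟨rfl, hImg⟩
            simp at hT hI
            simp [hT, hI, hnm, hP, hTop, hApp, hImg]
          · have hI : PySem.Chars.startswith m "image/".toList = false := by
              rw [himg]; simp only [Bool.eq_false_iff]; intro h
              exact hImg (swI.mp h).2
            by_cases hAud : top = "audio".toList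
            · have hA : PySem.Chars.startswith m "audio/".toList = true := by
                rw [haud]; exact swA.mpr ⟨rfl, hAud⟩
              simp at hT hI hA
              simp [hT, hI, hA, hnm, hP, hTop, hApp, hImg, hAud]
            · have hA : PySem.Chars.startswith m "audio/".toList = false := by
                rw [haud]; simp only [Bool.eq_false_iff]; intro h
                exact hAud (swA.mp h).2
              by_cases hVid : top = "video".toList
              · have hV : PySem.Chars.startswith m "video/".toList = true := by
                  rw [hvid]; exact swV.mpr ⟨rfl, hVid⟩
                simp at hT hI hA hV
                simp [hT, hI, hA, hV, hnm, hP, hTop, hApp, hImg, hAud, hVid]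
              · have hV : PySem.Chars.startswith m "video/".toList = false := by
                  rw [hvid]; simp only [Bool.eq_false_iff]; intro h
                  exact hVid (swV.mp h).2
                simp at hT hI hA hV hTop hApp hImg hAud hVid
                simp [hT, hI, hA, hV, hnm, hP, hTop, hApp, hImg, hAud, hVid]
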